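-- pv_equiv track=rewrite | github.com/tugisuwon86/smp_report | pages/consolidate_rolls.py | find_feasible_combo
-- ===== SOURCE A (Python) =====
-- from collections import Counter
-- import itertools
--
-- def find_feasible_combo(available_counts: Counter):
--     """
--     Find any feasible combo of sizes (length 2 or 3) whose sum == 60.
--     Preference ordering: combos with largest max part, then by fewer parts (2 before 3).
--     Returns tuple(parts_list) or None
--     """
--     sizes = sorted([s for s, c in available_counts.items() if c > 0])
--     # generate unique combos of length 2 or 3 (order doesn't matter)
--     combos = set()
--     # pairs
--     for a, b in itertools.combinations_with_replacement(sizes, 2):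
--         if a + b == 60:
--             combos.add(tuple(sorted((a, b), reverse=True)))
--     # triplets
--     for a, b, c in itertools.combinations_with_replacement(sizes, 3):
--         if a + b + c == 60:
--             combos.add(tuple(sorted((a, b, c), reverse=True)))
--
--     if not combos:
--         return None
--
--     # sort combos by priority: larger first element, then second, then prefer shorter combos (2 before 3)
--     combos = sorted(list(combos), key=lambda t: (t + (0,))[:3], reverse=True)
--     combos = sorted(combos, key=lambda t: (len(t),), reverse=False)  # prefer smaller length first
--     # combine sortings: first prefer length 2, then by descending parts
--     combos = sorted(list(combos), key=lambda t: (len(t), -t[0], - (t[1] if len(t)>1 else 0), - (t[2] if len(t)>2 else 0)))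
--     # find first feasible given counts
--     for combo in combos:
--         ok = True
--         tmp = Counter()
--         for part in combo:
--             tmp[part] += 1
--         for p, need in tmp.items():
--             if available_counts[p] < need:
--                 ok = False; break
--         if ok:
--             return list(combo)
--     return None
-- ===== SOURCE B (Python) =====
-- def find_feasible_combo(available_counts):
--     # Complement-lookup search: enumerate candidate combos directly in A's
--     # preference order (pairs before triples, parts descending) and return the
--     # first one whose multiplicities are available. O(n^2) vs A's O(n^3).
--     sizes = sorted((s for s, c in available_counts.items() if c > 0), reverse=True)
--     have = set(sizes)
--
--     def feasible(parts):
--         return all(available_counts[p] >= parts.count(p) for p in parts)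
--
--     for a in sizes:
--         b = 60 - a
--         if b <= a and b in have and feasible([a, b]):
--             return [a, b]
--     for i, a in enumerate(sizes):
--         for b in sizes[i:]:
--             c = 60 - a - b
--             if c <= b and c in have and feasible([a, b, c]):
--                 return [a, b, c]
--     return None
-- ===== Notes on version B (the rewrite author's own statement) =====
-- stated objective: faster
-- what changed: A enumerates all O(n^3) combinations_with_replacement of sizes, builds a set of candidate combos, sorts it three times and scans for the first feasible one; B never materialises or sorts combos: it walks the distinct sizes in descending order and finds the third part by complement lookup (b = 60-a, c = 60-a-b) in a hash set, returning the first feasible hit in the same preference order.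
import Mathlib
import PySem

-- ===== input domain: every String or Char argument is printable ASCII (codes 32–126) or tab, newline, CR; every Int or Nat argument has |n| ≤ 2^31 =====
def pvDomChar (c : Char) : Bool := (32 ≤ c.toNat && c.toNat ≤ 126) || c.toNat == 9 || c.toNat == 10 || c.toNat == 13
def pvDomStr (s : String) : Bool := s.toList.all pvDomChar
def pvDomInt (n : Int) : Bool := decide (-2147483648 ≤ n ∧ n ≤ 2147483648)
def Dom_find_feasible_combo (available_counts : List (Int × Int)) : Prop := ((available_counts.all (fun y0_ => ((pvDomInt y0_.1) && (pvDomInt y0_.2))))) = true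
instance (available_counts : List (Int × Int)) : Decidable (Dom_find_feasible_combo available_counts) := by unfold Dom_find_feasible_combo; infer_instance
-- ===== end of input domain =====

-- B replaces A's O(n^3) enumerate-all-combos-then-sort pipeline by a direct O(n^2)
-- complement-lookup search in preference order; equivalence of the RETURN value is proved
-- (neither program mutates its argument).

-- ===== PORT A =====
-- hand port of itertools.combinations_with_replacement(xs, 2): CPython's index-lexicographic order
def pvCwr2 : List Int → List (Int × Int)
  | [] => []
  | a :: t => ((a :: t).map (fun b => (a, b))) ++ pvCwr2 t

-- hand port of itertools.combinations_with_replacement(xs, 3), same order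
def pvCwr3 : List Int → List (Int × Int × Int)
  | [] => []
  | a :: t => ((pvCwr2 (a :: t)).map (fun bc => (a, bc.1, bc.2))) ++ pvCwr3 t

-- key (t + (0,))[:3] of A's first combo sort; exact for the tuples A sorts (length 2 or 3)
def pvKey1 (t : List Int) : Lex (Int × Lex (Int × Int)) :=
  toLex ((t ++ [0]).getD 0 0, toLex ((t ++ [0]).getD 1 0, (t ++ [0]).getD 2 0))

-- key (len(t), -t[0], -(t[1] if len(t)>1 else 0), -(t[2] if len(t)>2 else 0)) of A's final sort;
-- t[0]/t[1] via getD: exact for the tuples A sorts (length 2 or 3, so indices in range)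
def pvKeyFinal (t : List Int) : Lex (Nat × Lex (Int × Lex (Int × Int))) :=
  toLex (t.length, toLex (-(t.getD 0 0),
    toLex (-(if 1 < t.length then t.getD 1 0 else 0), -(if 2 < t.length then t.getD 2 0 else 0))))

-- A's final loop: first combo whose multiplicities (tmp = Counter(combo)) are all available
def pvScanA (d : PySem.Dict Int Int) : List (List Int) → Option (List Int)
  | [] => none
  | combo :: rest =>
    if (PySem.Dict.counter combo).items.all (fun pn => !decide (d.getD pn.1 0 < pn.2)) then
      some combo
    else pvScanA d rest

def find_feasible_combo (available_counts : List (Int × Int)) : Option (List Int) :=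
  let d : PySem.Dict Int Int := PySem.Dict.ofList available_counts
  let sizes := PySem.List.sorted ((d.items.filter (fun sc => decide (0 < sc.2))).map (fun sc => sc.1)) (fun x => x)
  let combos : PySem.Set (List Int) :=
    (pvCwr3 sizes).foldl
      (fun cs abc => if abc.1 + abc.2.1 + abc.2.2 = 60 then
          PySem.Set.add cs (PySem.List.sorted [abc.1, abc.2.1, abc.2.2] (fun x => x) true) else cs)
      ((pvCwr2 sizes).foldl
        (fun cs ab => if ab.1 + ab.2 = 60 then
            PySem.Set.add cs (PySem.List.sorted [ab.1, ab.2] (fun x => x) true) else cs)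
        PySem.Set.empty)
  if combos = [] then none
  else
    pvScanA d
      (PySem.List.sorted
        (PySem.List.sorted (PySem.List.sorted combos pvKey1 true) (fun t => t.length))
        pvKeyFinal)

-- ===== PORT B =====
-- Source B's nested helper 'feasible(parts)'
def pvFeasB (d : PySem.Dict Int Int) (parts : List Int) : Bool :=
  parts.all (fun p => decide ((parts.count p : Int) ≤ d.getD p 0))

def find_feasible_combo_alt (available_counts : List (Int × Int)) : Option (List Int) :=
  let d : PySem.Dict Int Int := PySem.Dict.ofList available_counts
  let sizes := PySem.List.sorted ((d.items.filter (fun sc => decide (0 < sc.2))).map (fun sc => sc.1)) (fun x => x) true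
  let haveS : PySem.Set Int := PySem.Set.ofList sizes
  match sizes.findSome? (fun a =>
      if 60 - a ≤ a ∧ (60 - a) ∈ haveS ∧ pvFeasB d [a, 60 - a] then some [a, 60 - a] else none) with
  | some r => some r
  | none =>
    (PySem.List.enumerate sizes).findSome? (fun ia =>
      (PySem.List.slice sizes (some ia.1)).findSome? (fun b =>
        if 60 - ia.2 - b ≤ b ∧ (60 - ia.2 - b) ∈ haveS ∧ pvFeasB d [ia.2, b, 60 - ia.2 - b] then
          some [ia.2, b, 60 - ia.2 - b] else none))

-- ===== PRECONDITION & SPEC =====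
def Spec_find_feasible_combo (available_counts : List (Int × Int)) (out : Option (List Int)) : Prop := out = find_feasible_combo_alt available_counts
instance (available_counts : List (Int × Int)) (out : Option (List Int)) : Decidable (Spec_find_feasible_combo available_counts out) := by unfold Spec_find_feasible_combo; infer_instance

-- ===== CLAIM (what is proved, stated in full; the proofs are below) =====
def Claim_equal_find_feasible_combo : Prop := ∀ (available_counts : List (Int × Int)), Dom_find_feasible_combo available_counts → Spec_find_feasible_combo available_counts (find_feasible_combo available_counts)

-- ===== LEMMAS AND PROOFS =====

-- the candidate lists B scans, and their shared membership characterisation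
def pvPairCands (haveS : List Int) (l : List Int) : List (List Int) :=
  l.filterMap (fun a => if 60 - a ≤ a ∧ (60 - a) ∈ haveS then some [a, 60 - a] else none)

def pvTripBlock (haveS : List Int) (a : Int) (l : List Int) : List (List Int) :=
  l.filterMap (fun b => if 60 - a - b ≤ b ∧ (60 - a - b) ∈ haveS then some [a, b, 60 - a - b] else none)

def pvTrips (haveS : List Int) : List Int → List (List Int)
  | [] => []
  | a :: t => pvTripBlock haveS a (a :: t) ++ pvTrips haveS t

-- A's scan is find? with A's multiplicity test
theorem pvScanA_eq_find? (d : PySem.Dict Int Int) (l : List (List Int)) :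
    pvScanA d l = l.find? (fun c => (PySem.Dict.counter c).items.all (fun pn => !decide (d.getD pn.1 0 < pn.2))) := by
  induction l with
  | nil => rfl
  | cons c rest ih =>
    rw [pvScanA, List.find?_cons]
    cases h : ((PySem.Dict.counter c).items.all (fun pn => !decide (d.getD pn.1 0 < pn.2))) with
    | true => simp
    | false => simp [ih]

-- A's Counter-based availability test equals B's count-based one
theorem pvFeas_eq (d : PySem.Dict Int Int) (c : List Int) :
    ((PySem.Dict.counter c).items.all (fun pn => !decide (d.getD pn.1 0 < pn.2))) = pvFeasB d c := by
  rw [PySem.Dict.items_counter, List.all_map, pvFeasB]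
  apply Bool.eq_iff_iff.mpr
  simp only [List.all_eq_true, Function.comp_apply, PySem.Set.mem_ofList, Bool.not_eq_eq_eq_not,
    Bool.not_true, decide_eq_false_iff_not, not_lt, decide_eq_true_eq]

-- an early-exit search with the feasibility test inlined in the condition equals
-- find? over the condition-filtered candidates
theorem pvFindBridge {α β : Type} (p1 p2 : α → Prop) [DecidablePred p1] [DecidablePred p2]
    (v : α → β) (q : β → Bool) (l : List α) :
    (l.findSome? (fun a => if p1 a ∧ p2 a ∧ q (v a) = true then some (v a) else none))
    = (l.filterMap (fun a => if p1 a ∧ p2 a then some (v a) else none)).find? q := by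
  induction l with
  | nil => rfl
  | cons x t ih =>
    by_cases hp1 : p1 x
    · by_cases hp2 : p2 x
      · by_cases hq : q (v x) = true
        · simp [List.findSome?_cons, List.filterMap_cons, List.find?_cons, hp1, hp2, hq, ih]
        · simp [List.findSome?_cons, List.filterMap_cons, List.find?_cons, hp1, hp2, hq, ih]
      · simp [List.findSome?_cons, List.filterMap_cons, hp1, hp2, ih]
    · simp [List.findSome?_cons, List.filterMap_cons, hp1, ih]

-- B's pair loop = find? over the pair candidate list
theorem pvPairBridge (d : PySem.Dict Int Int) (haveS : List Int) (l : List Int) :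
    (l.findSome? (fun a =>
      if 60 - a ≤ a ∧ (60 - a) ∈ haveS ∧ pvFeasB d [a, 60 - a] then some [a, 60 - a] else none))
    = (pvPairCands haveS l).find? (pvFeasB d) := by
  rw [pvPairCands]
  exact pvFindBridge (fun a => 60 - a ≤ a) (fun a => (60 - a) ∈ haveS)
    (fun a => [a, 60 - a]) (pvFeasB d) l

-- B's inner triple loop (fixed a) = find? over the block
theorem pvBlockBridge (d : PySem.Dict Int Int) (haveS : List Int) (a : Int) (l : List Int) :
    (l.findSome? (fun b =>
      if 60 - a - b ≤ b ∧ (60 - a - b) ∈ haveS ∧ pvFeasB d [a, b, 60 - a - b] then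
        some [a, b, 60 - a - b] else none))
    = (pvTripBlock haveS a l).find? (pvFeasB d) := by
  rw [pvTripBlock]
  exact pvFindBridge (fun b => 60 - a - b ≤ b) (fun b => (60 - a - b) ∈ haveS)
    (fun b => [a, b, 60 - a - b]) (pvFeasB d) l

-- B's enumerate/slice double loop = find? over pvTrips
theorem pvTripBridge (d : PySem.Dict Int Int) (haveS : List Int) (full : List Int) :
    ∀ (t : List Int) (i : Nat), List.drop i full = t →
    ((PySem.List.enumerate t (i : Int)).findSome? (fun ia =>
      (PySem.List.slice full (some ia.1)).findSome? (fun b =>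
        if 60 - ia.2 - b ≤ b ∧ (60 - ia.2 - b) ∈ haveS ∧ pvFeasB d [ia.2, b, 60 - ia.2 - b] then
          some [ia.2, b, 60 - ia.2 - b] else none)))
    = (pvTrips haveS t).find? (pvFeasB d) := by
  intro t
  induction t with
  | nil => intro i h; simp [PySem.List.enumerate, pvTrips]
  | cons a t ih =>
    intro i h
    have hs : PySem.List.slice full (some ((i : Nat) : Int)) = a :: t := by
      rw [PySem.List.slice_from full (Int.natCast_nonneg i)]
      simpa using h
    have hd : List.drop (i + 1) full = t := by
      have h1 : List.drop 1 (List.drop i full) = t := by rw [h]; rfl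
      rwa [List.drop_drop] at h1
    rw [PySem.List.enumerate_cons, List.findSome?_cons]
    dsimp only
    rw [hs, pvBlockBridge]
    have hcast : ((i : Int) + 1) = ((i + 1 : Nat) : Int) := by push_cast; ring
    rw [hcast, ih (i + 1) hd]
    simp only [pvTrips, List.find?_append]
    cases hb : (pvTripBlock haveS a (a :: t)).find? (pvFeasB d) <;> simp [hb, Option.or]

-- membership in combinations_with_replacement over a strictly increasing list
theorem pvMem_cwr2 (l : List Int) (hl : l.Pairwise (· < ·)) (a b : Int) :
    (a, b) ∈ pvCwr2 l ↔ a ∈ l ∧ b ∈ l ∧ a ≤ b := by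
  induction l with
  | nil => simp [pvCwr2]
  | cons x t ih =>
    rcases List.pairwise_cons.mp hl with ⟨hx, ht⟩
    simp only [pvCwr2, List.mem_append, List.mem_map, ih ht]
    constructor
    · rintro (⟨b', hb', heq⟩ | ⟨ha, hb, hab⟩)
      · obtain ⟨rfl, rfl⟩ : x = a ∧ b' = b := by
          simpa [Prod.mk.injEq] using heq
        refine ⟨by simp, hb', ?_⟩
        rcases List.mem_cons.mp hb' with rfl | hb''
        · exact le_refl _
        · exact le_of_lt (hx _ hb'')
      · exact ⟨List.mem_cons_of_mem _ ha, List.mem_cons_of_mem _ hb, hab⟩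
    · rintro ⟨ha, hb, hab⟩
      rcases List.mem_cons.mp ha with rfl | ha'
      · exact Or.inl ⟨b, hb, rfl⟩
      · rcases List.mem_cons.mp hb with rfl | hb'
        · exfalso; have := hx a ha'; omega
        · exact Or.inr ⟨ha', hb', hab⟩

theorem pvMem_cwr3 (l : List Int) (hl : l.Pairwise (· < ·)) (a b c : Int) :
    (a, b, c) ∈ pvCwr3 l ↔ a ∈ l ∧ b ∈ l ∧ c ∈ l ∧ a ≤ b ∧ b ≤ c := by
  induction l with
  | nil => simp [pvCwr3]
  | cons x t ih =>
    rcases List.pairwise_cons.mp hl with ⟨hx, ht⟩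
    simp only [pvCwr3, List.mem_append, List.mem_map, ih ht]
    constructor
    · rintro (⟨bc, hbc, heq⟩ | ⟨ha, hb, hc, hab, hbc'⟩)
      · obtain ⟨rfl, rfl⟩ : x = a ∧ bc = (b, c) := by
          simpa [Prod.mk.injEq, Prod.ext_iff] using heq
        obtain ⟨hb, hc, hbc'⟩ := (pvMem_cwr2 _ hl b c).mp hbc
        refine ⟨by simp, hb, hc, ?_, hbc'⟩
        rcases List.mem_cons.mp hb with rfl | hb''
        · exact le_refl _
        · exact le_of_lt (hx _ hb'')
      · exact ⟨List.mem_cons_of_mem _ ha, List.mem_cons_of_mem _ hb,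
          List.mem_cons_of_mem _ hc, hab, hbc'⟩
    · rintro ⟨ha, hb, hc, hab, hbc'⟩
      rcases List.mem_cons.mp ha with rfl | ha'
      · exact Or.inl ⟨(b, c), (pvMem_cwr2 (a :: t) hl b c).mpr ⟨hb, hc, hbc'⟩, rfl⟩
      · rcases List.mem_cons.mp hb with rfl | hb'
        · exfalso; have := hx a ha'; omega
        · rcases List.mem_cons.mp hc with rfl | hc'
          · exfalso; have := hx b hb'; omega
          · exact Or.inr ⟨ha', hb', hc', hab, hbc'⟩

theorem pvSorted_pair (a b : Int) (h : a ≤ b) :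
    PySem.List.sorted [a, b] (fun x => x) true = [b, a] := by
  apply PySem.List.eq_of_perm_of_pairwise_le_of_injective (fun x : Int => -x) neg_injective
  · exact (PySem.List.sorted_perm [a, b] (fun x => x) true).trans (List.Perm.swap b a [])
  · exact (PySem.List.sorted_pairwise_rev [a, b] (fun x => x)).imp (fun h => by omega)
  · simp [List.pairwise_cons]; omega

theorem pvSorted_triple (a b c : Int) (h1 : a ≤ b) (h2 : b ≤ c) :
    PySem.List.sorted [a, b, c] (fun x => x) true = [c, b, a] := by
  apply PySem.List.eq_of_perm_of_pairwise_le_of_injective (fun x : Int => -x) neg_injective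
  · refine (PySem.List.sorted_perm [a, b, c] (fun x => x) true).trans ?_
    have h3 : List.Perm [a, b, c] [a, c, b] := List.Perm.cons a (List.Perm.swap c b [])
    have h4 : List.Perm [a, c, b] [c, a, b] := List.Perm.swap c a [b]
    have h5 : List.Perm [c, a, b] [c, b, a] := List.Perm.cons c (List.Perm.swap b a [])
    exact (h3.trans h4).trans h5
  · exact (PySem.List.sorted_pairwise_rev [a, b, c] (fun x => x)).imp (fun h => by omega)
  · simp [List.pairwise_cons]; omega

-- membership in the set-building folds
theorem pvMem_foldl_add {γ : Type} (p : γ → Prop) [DecidablePred p] (f : γ → List Int)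
    (l : List γ) (s : PySem.Set (List Int)) (y : List Int) :
    (y ∈ l.foldl (fun cs x => if p x then PySem.Set.add cs (f x) else cs) s) ↔
      y ∈ s ∨ ∃ x ∈ l, p x ∧ y = f x := by
  induction l generalizing s with
  | nil => simp
  | cons x t ih =>
    simp only [List.foldl_cons]
    rw [ih]
    by_cases hp : p x
    · simp only [if_pos hp, PySem.Set.mem_add, List.mem_cons]
      constructor
      · rintro ((hy | rfl) | ⟨z, hz, hpz, rfl⟩)
        · exact Or.inl hy
        · exact Or.inr ⟨x, Or.inl rfl, hp, rfl⟩
        · exact Or.inr ⟨z, Or.inr hz, hpz, rfl⟩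
      · rintro (hy | ⟨z, hz | hz, hpz, rfl⟩)
        · exact Or.inl (Or.inl hy)
        · subst hz; exact Or.inl (Or.inr rfl)
        · exact Or.inr ⟨z, hz, hpz, rfl⟩
    · simp only [if_neg hp, List.mem_cons]
      constructor
      · rintro (hy | ⟨z, hz, hpz, rfl⟩)
        · exact Or.inl hy
        · exact Or.inr ⟨z, Or.inr hz, hpz, rfl⟩
      · rintro (hy | ⟨z, hz | hz, hpz, rfl⟩)
        · exact Or.inl hy
        · subst hz; exact absurd hpz hp
        · exact Or.inr ⟨z, hz, hpz, rfl⟩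

theorem pvNodup_foldl_add {γ : Type} (p : γ → Prop) [DecidablePred p] (f : γ → List Int)
    (l : List γ) (s : PySem.Set (List Int)) (hs : s.Nodup) :
    (l.foldl (fun cs x => if p x then PySem.Set.add cs (f x) else cs) s).Nodup := by
  induction l generalizing s with
  | nil => exact hs
  | cons x t ih =>
    simp only [List.foldl_cons]
    by_cases hp : p x
    · rw [if_pos hp]; exact ih _ (PySem.Set.nodup_add s (f x) hs)
    · rw [if_neg hp]; exact ih _ hs

-- key values on the two shapes
theorem pvKeyFinal_pair (a b : Int) :
    pvKeyFinal [a, b] = toLex (2, toLex (-a, toLex (-b, 0))) := by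
  rfl

theorem pvKeyFinal_triple (a b c : Int) :
    pvKeyFinal [a, b, c] = toLex (3, toLex (-a, toLex (-b, -c))) := by
  rfl

theorem pvKlt_pp (a b a' b' : Int) (h : a' < a) : pvKeyFinal [a, b] < pvKeyFinal [a', b'] := by
  rw [pvKeyFinal_pair, pvKeyFinal_pair, Prod.Lex.lt_iff]
  right
  refine ⟨rfl, ?_⟩
  rw [Prod.Lex.lt_iff]
  left; simpa using h

theorem pvKlt_pt (a b a' b' c' : Int) : pvKeyFinal [a, b] < pvKeyFinal [a', b', c'] := by
  rw [pvKeyFinal_pair, pvKeyFinal_triple, Prod.Lex.lt_iff]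
  left; simp

theorem pvKlt_tt_fst (a b c a' b' c' : Int) (h : a' < a) :
    pvKeyFinal [a, b, c] < pvKeyFinal [a', b', c'] := by
  rw [pvKeyFinal_triple, pvKeyFinal_triple, Prod.Lex.lt_iff]
  right
  refine ⟨rfl, ?_⟩
  rw [Prod.Lex.lt_iff]
  left; simpa using h

theorem pvKlt_tt_snd (a b c b' c' : Int) (h : b' < b) :
    pvKeyFinal [a, b, c] < pvKeyFinal [a, b', c'] := by
  rw [pvKeyFinal_triple, pvKeyFinal_triple, Prod.Lex.lt_iff]
  right
  refine ⟨rfl, ?_⟩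
  rw [Prod.Lex.lt_iff]
  right
  refine ⟨rfl, ?_⟩
  rw [Prod.Lex.lt_iff]
  left; simpa using h

-- membership characterisations of B's candidate lists
theorem pvMem_pairCands (haveS l : List Int) (y : List Int) :
    y ∈ pvPairCands haveS l ↔ ∃ a ∈ l, 60 - a ≤ a ∧ (60 - a) ∈ haveS ∧ y = [a, 60 - a] := by
  simp only [pvPairCands, List.mem_filterMap, Option.ite_none_right_eq_some, Option.some.injEq]
  constructor
  · rintro ⟨a, ha, ⟨hc1, hc2⟩, rfl⟩; exact ⟨a, ha, hc1, hc2, rfl⟩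
  · rintro ⟨a, ha, hc1, hc2, rfl⟩; exact ⟨a, ha, ⟨hc1, hc2⟩, rfl⟩

theorem pvMem_tripBlock (haveS : List Int) (a : Int) (l : List Int) (y : List Int) :
    y ∈ pvTripBlock haveS a l ↔ ∃ b ∈ l, 60 - a - b ≤ b ∧ (60 - a - b) ∈ haveS ∧ y = [a, b, 60 - a - b] := by
  simp only [pvTripBlock, List.mem_filterMap, Option.ite_none_right_eq_some, Option.some.injEq]
  constructor
  · rintro ⟨b, hb, ⟨hc1, hc2⟩, rfl⟩; exact ⟨b, hb, hc1, hc2, rfl⟩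
  · rintro ⟨b, hb, hc1, hc2, rfl⟩; exact ⟨b, hb, ⟨hc1, hc2⟩, rfl⟩

theorem pvMem_trips (haveS : List Int) (l : List Int) (hl : l.Pairwise (· > ·)) (y : List Int) :
    y ∈ pvTrips haveS l ↔ ∃ a ∈ l, ∃ b ∈ l, b ≤ a ∧ 60 - a - b ≤ b ∧ (60 - a - b) ∈ haveS ∧ y = [a, b, 60 - a - b] := by
  induction l with
  | nil => simp [pvTrips]
  | cons x t ih =>
    rcases List.pairwise_cons.mp hl with ⟨hx, ht⟩
    simp only [pvTrips, List.mem_append, pvMem_tripBlock, ih ht]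
    constructor
    · rintro (⟨b, hb, hc1, hc2, rfl⟩ | ⟨a, ha, b, hb, hba, hc1, hc2, rfl⟩)
      · refine ⟨x, by simp, b, hb, ?_, hc1, hc2, rfl⟩
        rcases List.mem_cons.mp hb with rfl | hb'
        · exact le_refl _
        · exact le_of_lt (hx _ hb')
      · exact ⟨a, List.mem_cons_of_mem _ ha, b, List.mem_cons_of_mem _ hb, hba, hc1, hc2, rfl⟩
    · rintro ⟨a, ha, b, hb, hba, hc1, hc2, rfl⟩
      rcases List.mem_cons.mp ha with rfl | ha'
      · exact Or.inl ⟨b, hb, hc1, hc2, rfl⟩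
      · rcases List.mem_cons.mp hb with rfl | hb'
        · exfalso; have := hx a ha'; omega
        · exact Or.inr ⟨a, ha', b, hb', hba, hc1, hc2, rfl⟩

-- B's candidate list is strictly increasing under A's final sort key
theorem pvPairwise_pairCands (haveS l : List Int) (hl : l.Pairwise (· > ·)) :
    (pvPairCands haveS l).Pairwise (fun x y => pvKeyFinal x < pvKeyFinal y) := by
  refine List.Pairwise.filterMap _ ?_ hl
  intro a a' hgt y hy y' hy'
  rw [Option.ite_none_right_eq_some, Option.some.injEq] at hy hy'
  obtain ⟨-, rfl⟩ := hy
  obtain ⟨-, rfl⟩ := hy'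
  exact pvKlt_pp _ _ _ _ hgt

theorem pvPairwise_trips (haveS l : List Int) (hl : l.Pairwise (· > ·)) :
    (pvTrips haveS l).Pairwise (fun x y => pvKeyFinal x < pvKeyFinal y) := by
  induction l with
  | nil => simp [pvTrips]
  | cons a t ih =>
    rcases List.pairwise_cons.mp hl with ⟨ha, ht⟩
    simp only [pvTrips]
    rw [List.pairwise_append]
    refine ⟨?_, ih ht, ?_⟩
    · refine List.Pairwise.filterMap _ ?_ hl
      intro b b' hgt y hy y' hy'
      rw [Option.ite_none_right_eq_some, Option.some.injEq] at hy hy'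
      obtain ⟨-, rfl⟩ := hy
      obtain ⟨-, rfl⟩ := hy'
      exact pvKlt_tt_snd _ _ _ _ _ hgt
    · intro x hx y hy
      obtain ⟨b, hb, hc1, hc2, rfl⟩ := (pvMem_tripBlock haveS a (a :: t) x).mp hx
      obtain ⟨a', ha', b', hb', hba', hc1', hc2', rfl⟩ := (pvMem_trips haveS t ht y).mp hy
      exact pvKlt_tt_fst _ _ _ _ _ _ (ha a' ha')

theorem pvPairwise_full (haveS l : List Int) (hl : l.Pairwise (· > ·)) :
    (pvPairCands haveS l ++ pvTrips haveS l).Pairwise (fun x y => pvKeyFinal x < pvKeyFinal y) := by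
  rw [List.pairwise_append]
  refine ⟨pvPairwise_pairCands haveS l hl, pvPairwise_trips haveS l hl, ?_⟩
  intro x hx y hy
  obtain ⟨a, ha, hc1, hc2, rfl⟩ := (pvMem_pairCands haveS l x).mp hx
  obtain ⟨a', ha', b', hb', hba', hc1', hc2', rfl⟩ := (pvMem_trips haveS l hl y).mp hy
  exact pvKlt_pt _ _ _ _ _

-- the main equivalence
theorem pvMain (ac : List (Int × Int)) :
    find_feasible_combo ac = find_feasible_combo_alt ac := by
  unfold find_feasible_combo find_feasible_combo_alt
  dsimp only
  set d : PySem.Dict Int Int := PySem.Dict.ofList ac with hd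
  set base : List Int := (d.items.filter (fun sc => decide (0 < sc.2))).map (fun sc => sc.1) with hbase
  set szA : List Int := PySem.List.sorted base (fun x => x) false with hszA
  set szD : List Int := PySem.List.sorted base (fun x => x) true with hszD
  set haveS : PySem.Set Int := PySem.Set.ofList szD with hhave
  set combos : PySem.Set (List Int) :=
    (pvCwr3 szA).foldl
      (fun cs abc => if abc.1 + abc.2.1 + abc.2.2 = 60 then
          PySem.Set.add cs (PySem.List.sorted [abc.1, abc.2.1, abc.2.2] (fun x => x) true) else cs)
      ((pvCwr2 szA).foldl
        (fun cs ab => if ab.1 + ab.2 = 60 then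
            PySem.Set.add cs (PySem.List.sorted [ab.1, ab.2] (fun x => x) true) else cs)
        PySem.Set.empty) with hcombos
  -- basic facts about the size lists
  have hbase_nodup : base.Nodup := by
    have h1 : (List.filter (fun sc => decide (0 < sc.2)) d.items).Sublist d.items :=
      List.filter_sublist
    have h2 : base.Sublist d.keys := by
      simpa [hbase, PySem.Dict.keys] using h1.map (fun sc : Int × Int => sc.1)
    exact h2.nodup (PySem.Dict.nodup_keys_ofList ac)
  have hszA_pw : szA.Pairwise (· < ·) := by
    have hle := PySem.List.sorted_pairwise base (fun x : Int => x)
    have hnd : szA.Nodup :=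
      ((PySem.List.sorted_perm base (fun x : Int => x) false).nodup_iff).mpr hbase_nodup
    exact (hle.and hnd).imp (fun h => lt_of_le_of_ne h.1 h.2)
  have hszD_pw : szD.Pairwise (· > ·) := by
    have hle := PySem.List.sorted_pairwise_rev base (fun x : Int => x)
    have hnd : szD.Nodup :=
      ((PySem.List.sorted_perm base (fun x : Int => x) true).nodup_iff).mpr hbase_nodup
    exact (hle.and hnd).imp (fun h => lt_of_le_of_ne h.1 (Ne.symm h.2))
  have hmemAD : ∀ x : Int, x ∈ szA ↔ x ∈ szD := by
    intro x
    rw [hszA, hszD, PySem.List.mem_sorted, PySem.List.mem_sorted]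
  -- the combo set has the same members as B's candidate list
  have hcombos_mem : ∀ y, y ∈ combos ↔ y ∈ pvPairCands haveS szD ++ pvTrips haveS szD := by
    intro y
    rw [hcombos]
    rw [pvMem_foldl_add (p := fun abc : Int × Int × Int => abc.1 + abc.2.1 + abc.2.2 = 60)
      (f := fun abc : Int × Int × Int => PySem.List.sorted [abc.1, abc.2.1, abc.2.2] (fun x => x) true)]
    rw [pvMem_foldl_add (p := fun ab : Int × Int => ab.1 + ab.2 = 60)
      (f := fun ab : Int × Int => PySem.List.sorted [ab.1, ab.2] (fun x => x) true)]
    have hempty : (y ∈ PySem.Set.empty) = False := by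
      simp [PySem.Set.empty]
    rw [List.mem_append, pvMem_pairCands, pvMem_trips haveS szD hszD_pw, hempty]
    simp only [false_or]
    constructor
    · rintro (⟨ab, hab, hsum, rfl⟩ | ⟨abc, habc, hsum, rfl⟩)
      · obtain ⟨ha, hb, hle⟩ := (pvMem_cwr2 szA hszA_pw ab.1 ab.2).mp hab
        rw [pvSorted_pair _ _ hle]
        left
        have e1 : (60 : Int) - ab.2 = ab.1 := by omega
        refine ⟨ab.2, (hmemAD _).mp hb, by omega, ?_, ?_⟩
        · rw [e1, hhave, PySem.Set.mem_ofList]; exact (hmemAD _).mp ha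
        · rw [e1]
      · obtain ⟨ha, hb, hc, hab, hbc⟩ := (pvMem_cwr3 szA hszA_pw abc.1 abc.2.1 abc.2.2).mp habc
        rw [pvSorted_triple _ _ _ hab hbc]
        right
        have e1 : (60 : Int) - abc.2.2 - abc.2.1 = abc.1 := by omega
        refine ⟨abc.2.2, (hmemAD _).mp hc, abc.2.1, (hmemAD _).mp hb, hbc, by omega, ?_, ?_⟩
        · rw [e1, hhave, PySem.Set.mem_ofList]; exact (hmemAD _).mp ha
        · rw [e1]
    · rintro (⟨a, haD, hle, hmem, rfl⟩ | ⟨A, hA, B, hB, hBA, hle, hmem, rfl⟩)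
      · left
        rw [hhave, PySem.Set.mem_ofList] at hmem
        refine ⟨(60 - a, a), (pvMem_cwr2 szA hszA_pw _ _).mpr
          ⟨(hmemAD _).mpr hmem, (hmemAD _).mpr haD, hle⟩, by dsimp only; omega, ?_⟩
        rw [pvSorted_pair _ _ hle]
      · right
        rw [hhave, PySem.Set.mem_ofList] at hmem
        refine ⟨(60 - A - B, B, A), (pvMem_cwr3 szA hszA_pw _ _ _).mpr
          ⟨(hmemAD _).mpr hmem, (hmemAD _).mpr hB, (hmemAD _).mpr hA, hle, hBA⟩,
          by dsimp only; omega, ?_⟩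
        rw [pvSorted_triple _ _ _ hle hBA]
  -- nodup on both sides, hence a permutation
  have hcombos_nodup : combos.Nodup := by
    rw [hcombos]
    exact pvNodup_foldl_add _ _ _ _ (pvNodup_foldl_add _ _ _ _ List.nodup_nil)
  have hL_pw := pvPairwise_full haveS szD hszD_pw
  have hL_nodup : (pvPairCands haveS szD ++ pvTrips haveS szD).Nodup :=
    hL_pw.imp (fun h heq => by rw [heq] at h; exact lt_irrefl _ h)
  have hperm : combos.Perm (pvPairCands haveS szD ++ pvTrips haveS szD) :=
    (List.perm_ext_iff_of_nodup hcombos_nodup hL_nodup).mpr hcombos_mem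
  -- A's triple sort produces exactly B's candidate list
  have hsorted : PySem.List.sorted
      (PySem.List.sorted (PySem.List.sorted combos pvKey1 true) (fun t => t.length) false)
      pvKeyFinal false = pvPairCands haveS szD ++ pvTrips haveS szD := by
    apply PySem.List.sorted_eq_of_perm_of_pairwise_lt
    · exact hperm.symm.trans
        ((PySem.List.sorted_perm combos pvKey1 true).symm.trans
          (PySem.List.sorted_perm _ (fun t : List Int => t.length) false).symm)
    · exact hL_pw
  -- rewrite B to a single find? over the candidate list
  rw [pvPairBridge d haveS szD]
  have h0 := pvTripBridge d haveS szD szD 0 List.drop_zero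
  rw [show ((0 : Nat) : Int) = (0 : Int) from rfl] at h0
  rw [h0]
  have hmatch : ∀ (o y : Option (List Int)),
      (match o with | some r => some r | none => y) = o.or y := by
    intro o y; cases o <;> rfl
  rw [hmatch, ← List.find?_append]
  -- rewrite A
  by_cases hempty : combos = []
  · rw [if_pos hempty]
    have hLnil : pvPairCands haveS szD ++ pvTrips haveS szD = [] := by
      rw [List.eq_nil_iff_forall_not_mem]
      intro y hy
      have := (hcombos_mem y).mpr hy
      rw [hempty] at this
      simp at this
    rw [hLnil]
    rfl
  · rw [if_neg hempty, pvScanA_eq_find?, hsorted]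
    simp only [pvFeas_eq]

-- ===== VERDICT (by name: the statement is the Claim_ definition above) =====
theorem find_feasible_combo_spec : Claim_equal_find_feasible_combo := by
  intro ac _
  unfold Spec_find_feasible_combo
  exact pvMain ac
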